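-- pv_equiv track=rewrite | github.com/CtriXin/mindkeeper | CtriXin-repo/ai-routing/scripts/smoke_e2e.py | _pick_one
-- ===== SOURCE A (Python) =====
-- _CLAUDE_KW = ("claude", "opus", "sonnet", "haiku")
--
-- _GPT_PREFIXES = ("gpt-", "o1-", "o3-", "o4-", "codex-")
--
-- def _classify(model: str) -> str:
--     lower = model.lower()
--     if any(k in lower for k in _CLAUDE_KW):
--         return "claude"
--     if lower.startswith(_GPT_PREFIXES):
--         return "gpt"
--     return "domestic"
--
-- def _pick_one(models: list[str], category: str) -> str | None:
--     """每个类别挑一个代表模型。"""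
--     preferred = {
--         "claude": ["claude-sonnet-4-6", "claude-opus-4-6"],
--         "gpt": ["gpt-5.4", "gpt-5", "gpt-5-codex"],
--         "domestic": [],  # 取第一个
--     }
--     candidates = [m for m in models if _classify(m) == category]
--     if not candidates:
--         return None
--     for pref in preferred.get(category, []):
--         if pref in candidates:
--             return pref
--     return candidates[0]
-- ===== SOURCE B (Python) =====
-- _CLAUDE_KW = ("claude", "opus", "sonnet", "haiku")
--
-- _GPT_PREFIXES = ("gpt-", "o1-", "o3-", "o4-", "codex-")
--
-- def _classify(model: str) -> str:
--     lower = model.lower()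
--     if any(k in lower for k in _CLAUDE_KW):
--         return "claude"
--     if lower.startswith(_GPT_PREFIXES):
--         return "gpt"
--     return "domestic"
--
-- _PREFERRED = {
--     "claude": ["claude-sonnet-4-6", "claude-opus-4-6"],
--     "gpt": ["gpt-5.4", "gpt-5", "gpt-5-codex"],
--     "domestic": [],
-- }
--
-- def _rank(prefs, m):
--     try:
--         return prefs.index(m)
--     except ValueError:
--         return len(prefs)
--
-- def _pick_one(models, category):
--     prefs = _PREFERRED.get(category, [])
--     best = None
--     for m in models:
--         if _classify(m) != category:
--             continue
--         if best is None or _rank(prefs, m) < _rank(prefs, best):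
--             best = m
--     return best
-- ===== Notes on version B (the rewrite author's own statement) =====
-- stated objective: alternative
-- what changed: One streaming pass over models keeping the best candidate by preference rank (index in the preferred list, len when absent, strict < so the first minimum wins), instead of materializing the candidate list and then scanning the preferred list for membership with a fall-through to candidates[0].
import Mathlib
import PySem

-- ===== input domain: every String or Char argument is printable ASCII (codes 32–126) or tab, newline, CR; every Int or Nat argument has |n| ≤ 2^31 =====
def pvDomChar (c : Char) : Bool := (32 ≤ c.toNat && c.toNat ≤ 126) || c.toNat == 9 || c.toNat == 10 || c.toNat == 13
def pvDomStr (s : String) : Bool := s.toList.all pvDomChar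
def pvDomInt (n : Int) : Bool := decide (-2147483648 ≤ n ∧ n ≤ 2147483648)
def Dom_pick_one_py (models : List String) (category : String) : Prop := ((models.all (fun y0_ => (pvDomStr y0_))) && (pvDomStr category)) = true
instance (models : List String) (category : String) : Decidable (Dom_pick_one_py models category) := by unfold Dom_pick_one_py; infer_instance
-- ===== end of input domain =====

-- B replaces the candidate-list + preferred-membership scan by one streaming pass keeping the
-- best candidate by preference rank; same return value, no speed claim (alternative structure).

-- ===== PORT A =====
-- shared module-level helper _classify (identical in Source A and Source B)
def pvClassify (model : String) : String :=
  let lower := PySem.Str.lower model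
  if ["claude", "opus", "sonnet", "haiku"].any (fun k => PySem.Str.isIn k lower) then "claude"
  else if ["gpt-", "o1-", "o3-", "o4-", "codex-"].any (fun p => PySem.Str.startswith lower p) then "gpt"
  else "domestic"

def pick_one_py (models : List String) (category : String) : Option String :=
  let preferred : PySem.Dict String (List String) :=
    ((PySem.Dict.empty.insert "claude" ["claude-sonnet-4-6", "claude-opus-4-6"]).insert
        "gpt" ["gpt-5.4", "gpt-5", "gpt-5-codex"]).insert "domestic" []
  let candidates := models.filter (fun m => pvClassify m == category)
  if candidates.isEmpty then none
  else
    match (preferred.getD category []).find? (fun pref => candidates.contains pref) with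
    | some pref => some pref
    | none => PySem.List.pyGet? candidates 0

-- ===== PORT B =====
-- module-level _PREFERRED table of Source B
def pvPreferred : PySem.Dict String (List String) :=
  ((PySem.Dict.empty.insert "claude" ["claude-sonnet-4-6", "claude-opus-4-6"]).insert
      "gpt" ["gpt-5.4", "gpt-5", "gpt-5-codex"]).insert "domestic" []

-- _rank: prefs.index(m), or len(prefs) on ValueError
def pvRank (prefs : List String) (m : String) : Nat :=
  (PySem.List.index? prefs m).getD prefs.length

def pick_one_py_alt (models : List String) (category : String) : Option String :=
  let prefs := pvPreferred.getD category []
  models.foldl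
    (fun best m =>
      if pvClassify m == category then
        match best with
        | none => some m
        | some b => if pvRank prefs m < pvRank prefs b then some m else best
      else best)
    none

-- ===== PRECONDITION & SPEC =====
def Spec_pick_one_py (models : List String) (category : String) (out : Option String) : Prop := out = pick_one_py_alt models category
instance (models : List String) (category : String) (out : Option String) : Decidable (Spec_pick_one_py models category out) := by unfold Spec_pick_one_py; infer_instance

-- ===== CLAIM (what is proved, stated in full; the proofs are below) =====
def Claim_equal_pick_one_py : Prop := ∀ (models : List String) (category : String), Dom_pick_one_py models category → Spec_pick_one_py models category (pick_one_py models category)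

-- ===== LEMMAS AND PROOFS =====

-- the loop body of B over an already-filtered candidate
def pvStep (prefs : List String) (best : Option String) (m : String) : Option String :=
  match best with
  | none => some m
  | some b => if pvRank prefs m < pvRank prefs b then some m else best

theorem pvRank_lt_of_mem {prefs : List String} {x : String} (h : x ∈ prefs) :
    pvRank prefs x < prefs.length := by
  unfold pvRank
  rcases Option.isSome_iff_exists.mp ((PySem.List.index?_isSome_iff prefs x).mpr h) with ⟨k, hk⟩
  rcases PySem.List.getElem_of_index?_eq_some hk with ⟨hlt, -, -⟩
  rw [hk]
  simpa using hlt

theorem pvRank_eq_len_of_not_mem {prefs : List String} {x : String} (h : x ∉ prefs) :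
    pvRank prefs x = prefs.length := by
  unfold pvRank
  rw [(PySem.List.index?_eq_none_iff prefs x).mpr h]
  rfl

theorem pvRank_cons_of_ne {p x : String} {rest : List String} (h : p ≠ x) :
    pvRank (p :: rest) x = pvRank rest x + 1 := by
  unfold pvRank
  rw [PySem.List.index?_cons_of_ne rest h]
  cases PySem.List.index? rest x <;> simp

theorem pvRank_cons_self (p : String) (rest : List String) : pvRank (p :: rest) p = 0 := by
  unfold pvRank
  rw [PySem.List.index?_cons_self]
  rfl

-- the fold over candidates returns a first element of minimal rank
theorem pvFold_min (prefs : List String) :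
    ∀ (t : List String) (b : String), ∃ w, t.foldl (pvStep prefs) (some b) = some w ∧
      w ∈ b :: t ∧ ∀ x ∈ b :: t, pvRank prefs w ≤ pvRank prefs x := by
  intro t
  induction t with
  | nil => intro b; exact ⟨b, by simp, by simp, by simp⟩
  | cons m t ih =>
    intro b
    simp only [List.foldl_cons]
    by_cases h : pvRank prefs m < pvRank prefs b
    · have hstep : pvStep prefs (some b) m = some m := by simp [pvStep, h]
      rw [hstep]
      rcases ih m with ⟨w, hw, hmem, hmin⟩
      simp only [List.mem_cons] at hmem hmin
      refine ⟨w, hw, ?_, ?_⟩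
      · simp only [List.mem_cons]; tauto
      · intro x hx
        simp only [List.mem_cons] at hx
        rcases hx with rfl | rfl | hx
        · exact le_trans (hmin m (Or.inl rfl)) (le_of_lt h)
        · exact hmin x (Or.inl rfl)
        · exact hmin x (Or.inr hx)
    · have hstep : pvStep prefs (some b) m = some b := by simp [pvStep, h]
      rw [hstep]
      rcases ih b with ⟨w, hw, hmem, hmin⟩
      simp only [List.mem_cons] at hmem hmin
      refine ⟨w, hw, ?_, ?_⟩
      · simp only [List.mem_cons]; tauto
      · intro x hx
        simp only [List.mem_cons] at hx
        rcases hx with rfl | rfl | hx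
        · exact hmin x (Or.inl rfl)
        · exact le_trans (hmin b (Or.inl rfl)) (Nat.le_of_not_lt h)
        · exact hmin x (Or.inr hx)

-- when no candidate is preferred the fold keeps the first candidate
theorem pvFold_const (prefs : List String) :
    ∀ (t : List String) (b : String), (∀ x ∈ t, pvRank prefs x = prefs.length) →
      pvRank prefs b = prefs.length → t.foldl (pvStep prefs) (some b) = some b := by
  intro t
  induction t with
  | nil => intro b _ _; simp
  | cons m t ih =>
    intro b ht hb
    have hm : pvRank prefs m = prefs.length := ht m (by simp)
    have hnlt : ¬ pvRank prefs m < pvRank prefs b := by omega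
    have hstep : pvStep prefs (some b) m = some b := by simp [pvStep, hnlt]
    rw [List.foldl_cons, hstep]
    exact ih b (fun x hx => ht x (by simp [hx])) hb

-- find? over prefs returns the minimal-rank candidate when one is preferred
theorem pvFind_of_min :
    ∀ (prefs cands : List String) (w : String), w ∈ cands →
      pvRank prefs w < prefs.length →
      (∀ x ∈ cands, pvRank prefs w ≤ pvRank prefs x) →
      prefs.find? (fun p => cands.contains p) = some w := by
  intro prefs
  induction prefs with
  | nil => intro cands w _ h _; simp [pvRank] at h
  | cons p rest ih =>
    intro cands w hw hlt hmin
    by_cases hp : p ∈ cands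
    · have h0 : pvRank (p :: rest) w = 0 := by
        have := hmin p hp
        rw [pvRank_cons_self] at this
        omega
      have hpw : p = w := by
        by_contra hne
        rw [pvRank_cons_of_ne hne] at h0
        omega
      rw [List.find?_cons_of_pos (by simpa using hp), hpw]
    · have hnem : ∀ x ∈ cands, p ≠ x := fun x hx he => hp (he ▸ hx)
      have hfind : rest.find? (fun q => cands.contains q) = some w := by
        apply ih cands w hw
        · have := pvRank_cons_of_ne (rest := rest) (hnem w hw)
          simp only [List.length_cons] at hlt
          omega
        · intro x hx
          have h1 := pvRank_cons_of_ne (rest := rest) (hnem w hw)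
          have h2 := pvRank_cons_of_ne (rest := rest) (hnem x hx)
          have := hmin x hx
          omega
      rw [List.find?_cons_of_neg (by simpa using hp)]
      exact hfind

theorem pvFind_none (prefs cands : List String)
    (h : ∀ x ∈ cands, x ∉ prefs) :
    prefs.find? (fun p => cands.contains p) = none := by
  rw [List.find?_eq_none]
  intro p hp
  simp only [List.contains_eq_mem, decide_eq_true_eq]
  exact fun hpc => h p hpc hp

-- ===== VERDICT (by name: the statement is the Claim_ definition above) =====
theorem pick_one_py_spec : Claim_equal_pick_one_py := by
  intro models category _
  unfold Spec_pick_one_py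
  show (if (models.filter (fun m => pvClassify m == category)).isEmpty then none
        else
          match (pvPreferred.getD category []).find?
              (fun pref => (models.filter (fun m => pvClassify m == category)).contains pref) with
          | some pref => some pref
          | none => PySem.List.pyGet? (models.filter (fun m => pvClassify m == category)) 0)
      = models.foldl
          (fun best m =>
            if pvClassify m == category then pvStep (pvPreferred.getD category []) best m else best)
          none
  rw [← List.foldl_filter]
  generalize pvPreferred.getD category [] = prefs
  generalize models.filter (fun m => pvClassify m == category) = cands
  cases cands with
  | nil => simp
  | cons c t =>
    simp only [List.isEmpty_cons, Bool.false_eq_true, if_false, List.foldl_cons]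
    have hstep0 : pvStep prefs none c = some c := rfl
    rw [hstep0]
    by_cases hex : ∃ x ∈ c :: t, x ∈ prefs
    · rcases pvFold_min prefs t c with ⟨w, hw, hmem, hmin⟩
      rcases hex with ⟨x, hx, hxp⟩
      have hwlt : pvRank prefs w < prefs.length :=
        lt_of_le_of_lt (hmin x hx) (pvRank_lt_of_mem hxp)
      rw [pvFind_of_min prefs (c :: t) w hmem hwlt hmin, hw]
    · push Not at hex
      have hall : ∀ x ∈ c :: t, pvRank prefs x = prefs.length :=
        fun x hx => pvRank_eq_len_of_not_mem (hex x hx)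
      rw [pvFind_none prefs (c :: t) hex,
        pvFold_const prefs t c (fun x hx => hall x (by simp [hx])) (hall c (by simp))]
      simp
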